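-- pv_equiv track=rewrite | github.com/Kurtis24/Terrahacks-Hackathon | backend/algo_v2.py | calculate_bump_height
-- ===== SOURCE A (Python) =====
-- def calculate_bump_height(collision_x, collision_y, occupied_points):
--     """
--     Calculate the height of the bump between two snake lines at collision point
--
--     Args:
--         collision_x, collision_y: Collision point coordinates
--         occupied_points: Set of occupied points from both snakes
--
--     Returns:
--         Height of the bump (Y-coordinate difference)
--     """
--     if not occupied_points:
--         return 5  # Default small bump height
--
--     # Look for occupied points in a small radius around collision point
--     search_radius = 10
--     nearby_y_coords = []
--
--     for x in range(collision_x - search_radius, collision_x + search_radius + 1):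
--         for y in range(collision_y - search_radius, collision_y + search_radius + 1):
--             if (x, y) in occupied_points and abs(x - collision_x) <= search_radius:
--                 nearby_y_coords.append(y)
--
--     if len(nearby_y_coords) < 2:
--         return 5  # Default if not enough points found
--
--     # Calculate the range (difference between max and min Y coordinates)
--     y_min = min(nearby_y_coords)
--     y_max = max(nearby_y_coords)
--     bump_height = y_max - y_min
--
--     # Limit bump height to a reasonable range (1-20 pixels)
--     bump_height = max(1, min(20, bump_height))
--
--     return bump_height
-- ===== SOURCE B (Python) =====
-- def calculate_bump_height(collision_x, collision_y, occupied_points):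
--     # One pass over the occupied points instead of scanning the 21x21 window:
--     # distinct points within the window are counted and a running y-min/y-max kept.
--     seen = set()
--     y_min = None
--     y_max = None
--     for p in occupied_points:
--         px, py = p
--         if abs(px - collision_x) <= 10 and abs(py - collision_y) <= 10 and p not in seen:
--             seen.add(p)
--             y_min = py if y_min is None else min(y_min, py)
--             y_max = py if y_max is None else max(y_max, py)
--     if len(seen) < 2:
--         return 5
--     return max(1, min(20, y_max - y_min))
-- ===== Notes on version B (the rewrite author's own statement) =====
-- stated objective: alternative
-- what changed: Replaces A's scan of the fixed 21x21 coordinate window (a membership test per grid cell) by a single pass over the occupied points themselves with an in-window test, deduplication via a seen-set, and a running y-min/y-max instead of collecting a list and taking min/max afterwards.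
import Mathlib
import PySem

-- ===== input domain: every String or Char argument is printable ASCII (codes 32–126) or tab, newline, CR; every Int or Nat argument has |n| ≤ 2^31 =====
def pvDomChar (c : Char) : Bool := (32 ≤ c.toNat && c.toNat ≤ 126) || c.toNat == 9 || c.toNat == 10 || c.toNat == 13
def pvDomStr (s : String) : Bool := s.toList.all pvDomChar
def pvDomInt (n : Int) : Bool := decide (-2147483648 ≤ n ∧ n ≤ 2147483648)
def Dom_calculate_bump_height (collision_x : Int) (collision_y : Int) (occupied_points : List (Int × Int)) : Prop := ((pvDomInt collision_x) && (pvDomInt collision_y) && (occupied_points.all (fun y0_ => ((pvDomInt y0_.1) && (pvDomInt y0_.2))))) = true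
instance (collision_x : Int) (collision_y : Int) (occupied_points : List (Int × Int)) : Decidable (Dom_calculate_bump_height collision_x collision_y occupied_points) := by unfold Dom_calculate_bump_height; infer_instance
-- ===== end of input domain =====

-- B replaces A's scan of the 21×21 coordinate window (with a membership test per cell)
-- by a single pass over the occupied points themselves, keeping a running y-min/y-max
-- of the distinct in-window points (objective: alternative traversal, same result).

-- ===== PORT A =====
def calculate_bump_height (collision_x : Int) (collision_y : Int) (occupied_points : List (Int × Int)) : Int :=
  if occupied_points = [] then 5
  else
    let nearby :=
      (PySem.List.pyRange (collision_x - 10) (collision_x + 10 + 1) 1).foldl (fun acc x =>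
        (PySem.List.pyRange (collision_y - 10) (collision_y + 10 + 1) 1).foldl (fun acc y =>
          if (x, y) ∈ occupied_points ∧ (x - collision_x).natAbs ≤ 10 then acc ++ [y] else acc) acc) []
    if nearby.length < 2 then 5
    else
      match PySem.List.min? nearby (fun y => y), PySem.List.max? nearby (fun y => y) with
      | some y_min, some y_max => max 1 (min 20 (y_max - y_min))
      | _, _ => 5  -- unreachable: nearby has ≥ 2 elements here

-- ===== PORT B =====
-- one loop step of Source B: window test, membership test on `seen`, set add, running min/max
def pvBStep (collision_x : Int) (collision_y : Int)
    (st : PySem.Set (Int × Int) × Option Int × Option Int) (p : Int × Int) :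
    PySem.Set (Int × Int) × Option Int × Option Int :=
  if (p.1 - collision_x).natAbs ≤ 10 ∧ (p.2 - collision_y).natAbs ≤ 10 ∧ p ∉ st.1 then
    (PySem.Set.add st.1 p,
     some (match st.2.1 with | none => p.2 | some m => min m p.2),
     some (match st.2.2 with | none => p.2 | some m => max m p.2))
  else st

def calculate_bump_height_alt (collision_x : Int) (collision_y : Int) (occupied_points : List (Int × Int)) : Int :=
  let st := occupied_points.foldl (pvBStep collision_x collision_y) ([], none, none)
  if st.1.length < 2 then 5
  else
    -- when len(seen) ≥ 2 both running extrema are `some`; `.getD 0` just reads them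
    max 1 (min 20 (st.2.2.getD 0 - st.2.1.getD 0))

-- ===== PRECONDITION & SPEC =====
def Spec_calculate_bump_height (collision_x : Int) (collision_y : Int) (occupied_points : List (Int × Int)) (out : Int) : Prop := out = calculate_bump_height_alt collision_x collision_y occupied_points
instance (collision_x : Int) (collision_y : Int) (occupied_points : List (Int × Int)) (out : Int) : Decidable (Spec_calculate_bump_height collision_x collision_y occupied_points out) := by unfold Spec_calculate_bump_height; infer_instance

-- ===== CLAIM (what is proved, stated in full; the proofs are below) =====
def Claim_equal_calculate_bump_height : Prop := ∀ (collision_x : Int) (collision_y : Int) (occupied_points : List (Int × Int)), Dom_calculate_bump_height collision_x collision_y occupied_points → Spec_calculate_bump_height collision_x collision_y occupied_points (calculate_bump_height collision_x collision_y occupied_points)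

-- ===== LEMMAS AND PROOFS =====

-- the "in window" predicate shared by both programs
abbrev pvW (cx cy : Int) (p : Int × Int) : Prop :=
  (p.1 - cx).natAbs ≤ 10 ∧ (p.2 - cy).natAbs ≤ 10

-- the `seen` component of B's loop, on its own
def pvSeen (cx cy : Int) (s : List (Int × Int)) (l : List (Int × Int)) : List (Int × Int) :=
  l.foldl (fun s p => if pvW cx cy p ∧ p ∉ s then s ++ [p] else s) s

-- running option-min / option-max, exactly B's update
def pvOminF : Option Int → Int → Option Int :=
  fun o y => some (match o with | none => y | some m => min m y)
def pvOmaxF : Option Int → Int → Option Int :=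
  fun o y => some (match o with | none => y | some m => max m y)
def pvOmin (ys : List Int) : Option Int := ys.foldl pvOminF none
def pvOmax (ys : List Int) : Option Int := ys.foldl pvOmaxF none

theorem pvSeen_mem (cx cy : Int) (l : List (Int × Int)) :
    ∀ s q, q ∈ pvSeen cx cy s l ↔ q ∈ s ∨ (q ∈ l ∧ pvW cx cy q) := by
  induction l with
  | nil => intro s q; simp [pvSeen]
  | cons p t ih =>
    intro s q
    by_cases h : pvW cx cy p ∧ p ∉ s
    · have hstep : pvSeen cx cy s (p :: t) = pvSeen cx cy (s ++ [p]) t := by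
        simp only [pvSeen, List.foldl_cons, if_pos h]
      rw [hstep, ih]
      simp only [List.mem_append, List.mem_cons]
      constructor
      · rintro ((hs | rfl | hnil) | ⟨ht, hw⟩)
        · tauto
        · exact Or.inr ⟨Or.inl rfl, h.1⟩
        · simp at hnil
        · tauto
      · rintro (hs | ⟨rfl | hq, hw⟩) <;> tauto
    · have hstep : pvSeen cx cy s (p :: t) = pvSeen cx cy s t := by
        simp only [pvSeen, List.foldl_cons, if_neg h]
      rw [hstep, ih]
      simp only [List.mem_cons]
      constructor
      · rintro (hs | ht) <;> tauto
      · rintro (hs | ⟨rfl | hq, hw⟩)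
        · tauto
        · rcases not_and_or.mp h with h1 | h2
          · exact absurd hw h1
          · exact Or.inl (not_not.mp h2)
        · tauto
  
theorem pvSeen_nodup (cx cy : Int) (l : List (Int × Int)) :
    ∀ s : List (Int × Int), s.Nodup → (pvSeen cx cy s l).Nodup := by
  induction l with
  | nil => intro s hs; simpa [pvSeen] using hs
  | cons p t ih =>
    intro s hs
    by_cases h : pvW cx cy p ∧ p ∉ s
    · have hstep : pvSeen cx cy s (p :: t) = pvSeen cx cy (s ++ [p]) t := by
        simp only [pvSeen, List.foldl_cons, if_pos h]
      rw [hstep]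
      refine ih _ (List.nodup_append.mpr ⟨hs, List.nodup_singleton _, ?_⟩)
      intro a ha b hb
      simp only [List.mem_singleton] at hb
      subst hb
      exact fun hab => h.2 (hab ▸ ha)
    · have hstep : pvSeen cx cy s (p :: t) = pvSeen cx cy s t := by
        simp only [pvSeen, List.foldl_cons, if_neg h]
      rw [hstep]; exact ih _ hs

-- B's whole fold, characterised by pvSeen / pvOmin / pvOmax
theorem pvBfold (cx cy : Int) (l : List (Int × Int)) :
    ∀ s : List (Int × Int),
      l.foldl (pvBStep cx cy) (s, pvOmin (s.map Prod.snd), pvOmax (s.map Prod.snd)) =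
        (pvSeen cx cy s l,
         pvOmin ((pvSeen cx cy s l).map Prod.snd),
         pvOmax ((pvSeen cx cy s l).map Prod.snd)) := by
  induction l with
  | nil => intro s; simp [pvSeen]
  | cons p t ih =>
    intro s
    by_cases h : pvW cx cy p ∧ p ∉ s
    · have hseen : pvSeen cx cy s (p :: t) = pvSeen cx cy (s ++ [p]) t := by
        simp only [pvSeen, List.foldl_cons, if_pos h]
      have hadd : PySem.Set.add s p = s ++ [p] := by
        simp [PySem.Set.add, h.2]
      have hstep : pvBStep cx cy (s, pvOmin (s.map Prod.snd), pvOmax (s.map Prod.snd)) p =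
          ((s ++ [p]), pvOmin ((s ++ [p]).map Prod.snd), pvOmax ((s ++ [p]).map Prod.snd)) := by
        simp only [pvBStep, pvW] at h ⊢
        rw [if_pos ⟨h.1.1, h.1.2, h.2⟩, hadd]
        simp [pvOmin, pvOmax, List.foldl_append, pvOminF, pvOmaxF]
      rw [hseen, List.foldl_cons, hstep, ih (s ++ [p])]
    · have hseen : pvSeen cx cy s (p :: t) = pvSeen cx cy s t := by
        simp only [pvSeen, List.foldl_cons, if_neg h]
      have hstep : pvBStep cx cy (s, pvOmin (s.map Prod.snd), pvOmax (s.map Prod.snd)) p =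
          (s, pvOmin (s.map Prod.snd), pvOmax (s.map Prod.snd)) := by
        simp only [pvBStep, pvW] at h ⊢
        rw [if_neg (by tauto)]
      rw [hseen, List.foldl_cons, hstep, ih s]

theorem pvOminF_some (t : List Int) : ∀ m : Int, t.foldl pvOminF (some m) = some (t.foldl min m) := by
  induction t with
  | nil => intro m; rfl
  | cons y t ih => intro m; simpa [pvOminF] using ih (min m y)

theorem pvOmaxF_some (t : List Int) : ∀ m : Int, t.foldl pvOmaxF (some m) = some (t.foldl max m) := by
  induction t with
  | nil => intro m; rfl
  | cons y t ih => intro m; simpa [pvOmaxF] using ih (max m y)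

theorem pvOmin_cons (y : Int) (t : List Int) : pvOmin (y :: t) = some (t.foldl min y) := by
  simpa [pvOmin, pvOminF] using pvOminF_some t y

theorem pvOmax_cons (y : Int) (t : List Int) : pvOmax (y :: t) = some (t.foldl max y) := by
  simpa [pvOmax, pvOmaxF] using pvOmaxF_some t y

-- the grid points A's double loop visits and keeps, as pairs
def pvPa (cx cy : Int) (occ : List (Int × Int)) : List (Int × Int) :=
  (PySem.List.pyRange (cx - 10) (cx + 10 + 1) 1).flatMap (fun x =>
    ((PySem.List.pyRange (cy - 10) (cy + 10 + 1) 1).filter (fun y => decide ((x, y) ∈ occ))).map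
      (fun y => (x, y)))

theorem pvNearby_eq (cx cy : Int) (occ : List (Int × Int)) :
    (PySem.List.pyRange (cx - 10) (cx + 10 + 1) 1).foldl (fun acc x =>
        (PySem.List.pyRange (cy - 10) (cy + 10 + 1) 1).foldl (fun acc y =>
          if (x, y) ∈ occ ∧ (x - cx).natAbs ≤ 10 then acc ++ [y] else acc) acc) [] =
      (pvPa cx cy occ).map Prod.snd := by
  have hinner : ∀ (x : Int) (acc : List Int),
      (PySem.List.pyRange (cy - 10) (cy + 10 + 1) 1).foldl (fun acc y =>
        if (x, y) ∈ occ ∧ (x - cx).natAbs ≤ 10 then acc ++ [y] else acc) acc =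
      acc ++ ((PySem.List.pyRange (cy - 10) (cy + 10 + 1) 1).filter
        (fun y => decide ((x, y) ∈ occ ∧ (x - cx).natAbs ≤ 10))).map id := by
    intro x acc
    rw [← PySem.List.foldl_append_if (fun y => decide ((x, y) ∈ occ ∧ (x - cx).natAbs ≤ 10)) id]
    simp
  calc (PySem.List.pyRange (cx - 10) (cx + 10 + 1) 1).foldl (fun acc x =>
        (PySem.List.pyRange (cy - 10) (cy + 10 + 1) 1).foldl (fun acc y =>
          if (x, y) ∈ occ ∧ (x - cx).natAbs ≤ 10 then acc ++ [y] else acc) acc) []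
      = (PySem.List.pyRange (cx - 10) (cx + 10 + 1) 1).foldl (fun acc x =>
          acc ++ ((PySem.List.pyRange (cy - 10) (cy + 10 + 1) 1).filter
            (fun y => decide ((x, y) ∈ occ ∧ (x - cx).natAbs ≤ 10))).map id) [] := by
        apply PySem.List.foldl_congr_mem
        intro acc x _
        exact hinner x acc
    _ = (PySem.List.pyRange (cx - 10) (cx + 10 + 1) 1).flatMap (fun x =>
          ((PySem.List.pyRange (cy - 10) (cy + 10 + 1) 1).filter
            (fun y => decide ((x, y) ∈ occ ∧ (x - cx).natAbs ≤ 10))).map id) := by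
        rw [PySem.List.foldl_append_eq_flatMap]; simp
    _ = (pvPa cx cy occ).map Prod.snd := by
        rw [pvPa, List.map_flatMap]
        apply List.flatMap_congr
        intro x hx
        have hxw : (x - cx).natAbs ≤ 10 := by
          rw [PySem.List.mem_pyRange_one] at hx; omega
        rw [List.map_map]
        have : ((PySem.List.pyRange (cy - 10) (cy + 10 + 1) 1).filter
            (fun y => decide ((x, y) ∈ occ ∧ (x - cx).natAbs ≤ 10))) =
            ((PySem.List.pyRange (cy - 10) (cy + 10 + 1) 1).filter (fun y => decide ((x, y) ∈ occ))) := by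
          apply List.filter_congr
          intro y _
          simp [hxw]
        rw [this]
        simp [Function.comp_def]

theorem pvPa_mem (cx cy : Int) (occ : List (Int × Int)) (q : Int × Int) :
    q ∈ pvPa cx cy occ ↔ q ∈ occ ∧ pvW cx cy q := by
  simp only [pvPa, List.mem_flatMap, List.mem_map, List.mem_filter, PySem.List.mem_pyRange_one,
    decide_eq_true_eq, pvW]
  constructor
  · rintro ⟨x, ⟨hx1, hx2⟩, y, ⟨⟨hy1, hy2⟩, hmem⟩, rfl⟩
    exact ⟨hmem, by simp; omega, by simp; omega⟩
  · rintro ⟨hmem, h1, h2⟩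
    exact ⟨q.1, by omega, q.2, ⟨⟨by omega, by omega⟩, by simpa using hmem⟩, rfl⟩

theorem pvPa_nodup (cx cy : Int) (occ : List (Int × Int)) : (pvPa cx cy occ).Nodup := by
  rw [pvPa, List.flatMap_def]
  rw [List.nodup_flatten]
  constructor
  · intro l hl
    simp only [List.mem_map] at hl
    obtain ⟨x, _, rfl⟩ := hl
    exact ((PySem.List.nodup_pyRange_one _ _).filter _).map
      (fun a b h => by simpa using congrArg Prod.snd h)
  · refine List.Pairwise.map _ ?_ (PySem.List.nodup_pyRange_one (cx - 10) (cx + 10 + 1))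
    intro x1 x2 hne q hq1 hq2
    simp only [List.mem_map, List.mem_filter] at hq1 hq2
    obtain ⟨y1, _, rfl⟩ := hq1
    obtain ⟨y2, _, h⟩ := hq2
    exact hne (by simpa using congrArg Prod.fst h.symm)

theorem pvPa_perm_seen (cx cy : Int) (occ : List (Int × Int)) :
    (pvPa cx cy occ).Perm (pvSeen cx cy [] occ) := by
  rw [List.perm_ext_iff_of_nodup (pvPa_nodup cx cy occ)
    (pvSeen_nodup cx cy occ [] (by simp))]
  intro q
  rw [pvPa_mem, pvSeen_mem]
  simp

-- ===== VERDICT (by name: the statement is the Claim_ definition above) =====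
theorem calculate_bump_height_spec : Claim_equal_calculate_bump_height := by
  intro cx cy occ _
  unfold Spec_calculate_bump_height
  unfold calculate_bump_height calculate_bump_height_alt
  have hfold := pvBfold cx cy occ []
  simp only [List.map_nil] at hfold
  have hnone : (pvOmin ([] : List Int)) = none := rfl
  have hnone' : (pvOmax ([] : List Int)) = none := rfl
  rw [hnone, hnone'] at hfold
  rw [hfold]
  dsimp only
  set S := pvSeen cx cy [] occ with hS
  set ys := S.map Prod.snd with hys
  rw [pvNearby_eq cx cy occ]
  have hperm : ((pvPa cx cy occ).map Prod.snd).Perm ys :=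
    List.Perm.map Prod.snd (pvPa_perm_seen cx cy occ)
  have hlen : ((pvPa cx cy occ).map Prod.snd).length = S.length := by
    rw [hperm.length_eq, hys, List.length_map]
  by_cases hocc : occ = []
  · subst hocc
    simp [pvSeen] at hS
    simp [hS]
  · rw [if_neg hocc]
    by_cases hlt : ((pvPa cx cy occ).map Prod.snd).length < 2
    · rw [if_pos hlt, if_pos (by omega)]
    · rw [if_neg hlt, if_neg (by omega)]
      obtain ⟨y, t, hLa⟩ : ∃ y t, (pvPa cx cy occ).map Prod.snd = y :: t := by
        cases h : (pvPa cx cy occ).map Prod.snd with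
        | nil => rw [h] at hlt; simp at hlt
        | cons a b => exact ⟨a, b, rfl⟩
      haveI : RightCommutative pvOminF := ⟨by
        intro o a b; cases o <;> simp [pvOminF] <;> omega⟩
      haveI : RightCommutative pvOmaxF := ⟨by
        intro o a b; cases o <;> simp [pvOmaxF] <;> omega⟩
      have hmin : pvOmin ys = some (t.foldl min y) := by
        show ys.foldl pvOminF none = some (t.foldl min y)
        rw [← hperm.foldl_eq none, hLa]
        exact pvOmin_cons y t
      have hmax : pvOmax ys = some (t.foldl max y) := by
        show ys.foldl pvOmaxF none = some (t.foldl max y)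
        rw [← hperm.foldl_eq none, hLa]
        exact pvOmax_cons y t
      rw [hLa, PySem.List.min?_id_cons, PySem.List.max?_id_cons, hmin, hmax]
      rfl
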